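-- pv_equiv track=rewrite | github.com/northstaraokeystone/FloridaProof | src/cascade.py | trace_cascade_path
-- ===== SOURCE A (Python) =====
-- def trace_cascade_path(
--     graph: dict, source: str, target: str, path: list | None = None, visited: set | None = None
-- ) -> list:
--     """Reconstruct the cascade pathway for audit."""
--     if path is None:
--         path = []
--     if visited is None:
--         visited = set()
--
--     path = path + [source]
--     visited.add(source)
--
--     if source == target:
--         return path
--
--     if source not in graph:
--         return []
--
--     for next_node in graph[source]:
--         if next_node not in visited:
--             new_path = trace_cascade_path(graph, next_node, target, path, visited.copy())
--             if new_path: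
--                 return new_path
--
--     return []
-- ===== SOURCE B (Python) =====
-- def trace_cascade_path(
--     graph: dict, source: str, target: str, path: list | None = None, visited: set | None = None
-- ) -> list:
--     """Iterative depth-first search with an explicit stack (same first path as the recursive original)."""
--     stack = [(source, [] if path is None else list(path), set() if visited is None else set(visited))]
--     while stack:
--         node, prefix, vis = stack.pop()
--         cur = prefix + [node]
--         seen = vis | {node}
--         if node == target:
--             return cur
--         nbrs = graph.get(node)
--         if nbrs is None:
--             continue
--         stack.extend((n, cur, seen) for n in reversed(nbrs) if n not in seen)
--     return []
-- ===== Notes on version B (the rewrite author's own statement) =====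
-- stated objective: alternative
-- what changed: The recursive depth-first search (with an early-return neighbour loop in each call frame) is replaced by an iterative depth-first search driven by an explicit LIFO stack of (node, path-prefix, visited) frames, which visits nodes in the same order and returns the same first path without recursion.
import Mathlib
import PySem

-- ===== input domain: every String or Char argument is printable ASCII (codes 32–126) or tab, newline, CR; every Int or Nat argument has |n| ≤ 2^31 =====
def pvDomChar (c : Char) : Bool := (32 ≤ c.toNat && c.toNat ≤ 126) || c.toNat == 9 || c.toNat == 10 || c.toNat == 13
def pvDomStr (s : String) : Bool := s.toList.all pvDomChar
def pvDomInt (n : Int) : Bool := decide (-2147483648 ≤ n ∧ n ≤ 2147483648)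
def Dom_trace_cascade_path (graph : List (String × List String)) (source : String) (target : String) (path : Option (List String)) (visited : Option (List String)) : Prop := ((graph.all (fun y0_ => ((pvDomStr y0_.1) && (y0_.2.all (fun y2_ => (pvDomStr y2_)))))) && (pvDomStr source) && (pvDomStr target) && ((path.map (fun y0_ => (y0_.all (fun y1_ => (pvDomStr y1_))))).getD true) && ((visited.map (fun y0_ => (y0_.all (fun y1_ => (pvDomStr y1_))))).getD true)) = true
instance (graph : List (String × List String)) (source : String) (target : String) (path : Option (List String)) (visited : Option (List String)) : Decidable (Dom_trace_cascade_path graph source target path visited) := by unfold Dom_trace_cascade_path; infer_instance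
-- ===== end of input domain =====

-- B replaces A's recursive depth-first search by an iterative one with an explicit stack of
-- (node, path-prefix, visited) frames (same traversal order, same first path). Equivalence is about
-- the RETURN value only: Python A mutates the caller's visited set (adds source); B does not.

-- ===== PORT A =====
-- pvFree/pvCap and the lemmas below are cited only by the ports' decreasing_by blocks:
-- termination-measure machinery, not part of either algorithm.
def pvFree (g : List (String × List String)) (vis : PySem.Set String) : Nat :=
  ((g.map Prod.fst).filter (fun k => !(PySem.Set.contains vis k))).length

def pvCap (g : List (String × List String)) : Nat :=
  (g.map (fun p => p.2.length)).foldr Nat.max 0 + 2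

lemma pv_length_filter_ne_lt (l : List String) (u : String) (hu : u ∈ l) :
    (l.filter (fun k => !(k == u))).length < l.length := by
  induction l with
  | nil => simp at hu
  | cons a as ih =>
    by_cases hau : a = u
    · subst hau
      simp only [List.filter_cons, beq_self_eq_true, Bool.not_true, List.length_cons]
      exact Nat.lt_succ_of_le (List.length_filter_le _ _)
    · rcases List.mem_cons.mp hu with rfl | ha
      · exact absurd rfl hau
      · simp only [List.filter_cons, List.length_cons]
        have : (a == u) = false := by simp [hau]
        simp only [this, Bool.not_false, if_true, List.length_cons]
        exact Nat.succ_lt_succ (ih ha)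

lemma pv_contains_append_single (vis : List String) (u k : String) :
    (!(PySem.Set.contains (vis ++ [u]) k)) = ((!(k == u)) && (!(PySem.Set.contains vis k))) := by
  by_cases h1 : k ∈ vis <;> by_cases h2 : k = u <;>
    simp [PySem.Set.contains, h1, h2]

lemma pvFree_add_lt (g : List (String × List String)) (vis : PySem.Set String) (u : String)
    (hmem : u ∈ g.map Prod.fst) (h : PySem.Set.contains vis u = false) :
    pvFree g (PySem.Set.add vis u) < pvFree g vis := by
  unfold pvFree
  have hadd : PySem.Set.add vis u = vis ++ [u] := by
    simp only [PySem.Set.add, h]; simp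
  rw [hadd]
  simp only [pv_contains_append_single]
  rw [← List.filter_filter]
  apply pv_length_filter_ne_lt
  simp only [List.mem_filter]
  refine ⟨hmem, ?_⟩
  have h' : u ∉ vis := by simpa [PySem.Set.contains] using h
  simp [h']

lemma pvFree_add_eq (g : List (String × List String)) (vis : PySem.Set String) (u : String)
    (h : PySem.Set.contains vis u = true) : PySem.Set.add vis u = vis := by
  simp only [PySem.Set.add, h, if_true]

lemma pv_len_lt_cap (g : List (String × List String)) (u : String) (ns : List String)
    (h : (PySem.Dict.mk g).get? u = some ns) : ns.length + 2 ≤ pvCap g := by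
  have hmem : (u, ns) ∈ g := PySem.Dict.mem_items_of_get?_eq_some _ h
  have h1 : ns.length ∈ g.map (fun p => p.2.length) := List.mem_map.mpr ⟨(u, ns), hmem, rfl⟩
  have h2 : ∀ (l : List Nat) (x : Nat), x ∈ l → x ≤ l.foldr Nat.max 0 := by
    intro l
    induction l with
    | nil => intro x hx; simp at hx
    | cons a as ih =>
      intro x hx
      rcases List.mem_cons.mp hx with rfl | h
      · exact Nat.le_max_left _ _
      · exact le_trans (ih x h) (Nat.le_max_right _ _)
  have h3 := h2 _ _ h1
  unfold pvCap
  exact Nat.add_le_add_right h3 2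

-- decrease of the DFS measure on entering the neighbour loop
lemma pv_dec_enter (g : List (String × List String)) (u : String) (vis : PySem.Set String)
    (ns : List String) (hns : (PySem.Dict.mk g).get? u = some ns) :
    2 * pvFree g (PySem.Set.add vis u) * pvCap g + ns.length
      < (2 * pvFree g vis + (if PySem.Set.contains vis u then 1 else 0)) * pvCap g := by
  have hcap := pv_len_lt_cap g u ns hns
  by_cases hc : PySem.Set.contains vis u = true
  · rw [pvFree_add_eq g vis u hc, if_pos hc, Nat.add_mul, Nat.one_mul]
    exact Nat.add_lt_add_left (Nat.lt_of_lt_of_le (Nat.lt_add_of_pos_right Nat.zero_lt_two) hcap) _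
  · have hmemk : u ∈ g.map Prod.fst :=
      PySem.Dict.mem_keys_of_mem_items _ (PySem.Dict.mem_items_of_get?_eq_some _ hns)
    have hlt := pvFree_add_lt g vis u hmemk (Bool.not_eq_true _ ▸ hc)
    rw [if_neg hc, Nat.add_zero]
    have h1 : 2 * pvFree g (PySem.Set.add vis u) + 2 ≤ 2 * pvFree g vis := by
      rw [← Nat.mul_succ]
      exact Nat.mul_le_mul_left 2 (Nat.succ_le_of_lt hlt)
    have h2 := Nat.mul_le_mul_right (pvCap g) h1
    rw [Nat.add_mul] at h2
    have hlen : ns.length < 2 * pvCap g :=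
      Nat.lt_of_lt_of_le (Nat.lt_of_lt_of_le (Nat.lt_add_of_pos_right Nat.zero_lt_two) hcap)
        (Nat.le_mul_of_pos_left _ Nat.zero_lt_two)
    calc 2 * pvFree g (PySem.Set.add vis u) * pvCap g + ns.length
        < 2 * pvFree g (PySem.Set.add vis u) * pvCap g + 2 * pvCap g :=
          Nat.add_lt_add_left hlen _
      _ ≤ 2 * pvFree g vis * pvCap g := h2

-- decrease of the loop measure on a recursive DFS call
lemma pv_dec_call (g : List (String × List String)) (v : String) (vis' : PySem.Set String)
    (vs : List String) (hc : PySem.Set.contains vis' v = false) :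
    (2 * pvFree g vis' + (if PySem.Set.contains vis' v then 1 else 0)) * pvCap g
      < 2 * pvFree g vis' * pvCap g + (v :: vs).length := by
  rw [if_neg (by simp only [hc]; simp), Nat.add_zero]
  exact Nat.lt_add_of_pos_right (Nat.succ_pos _)

-- decrease of the loop measure on skipping to the next neighbour
lemma pv_dec_skip (g : List (String × List String)) (vis' : PySem.Set String)
    (v : String) (vs : List String) :
    2 * pvFree g vis' * pvCap g + vs.length
      < 2 * pvFree g vis' * pvCap g + (v :: vs).length :=
  Nat.add_lt_add_left (Nat.lt_succ_self _) _

-- literal transliteration of A: recursive DFS; pvGoA is the `for next_node in graph[source]` loop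
mutual
def pvDfsA (g : List (String × List String)) (t : String) (u : String)
    (path : List String) (vis : PySem.Set String) : List String :=
  let path' := path ++ [u]
  let vis' := PySem.Set.add vis u
  if u = t then path'
  else
    match hns : (PySem.Dict.mk g).get? u with
    | none => []
    | some ns => pvGoA g t ns path' vis'
termination_by (2 * pvFree g vis + (if PySem.Set.contains vis u then 1 else 0)) * pvCap g
decreasing_by exact pv_dec_enter g u vis ns hns

def pvGoA (g : List (String × List String)) (t : String) (ns : List String)
    (path' : List String) (vis' : PySem.Set String) : List String :=
  match ns with
  | [] => []
  | v :: vs =>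
    if PySem.Set.contains vis' v then
      pvGoA g t vs path' vis'
    else
      let new_path := pvDfsA g t v path' vis'
      if new_path ≠ [] then new_path else pvGoA g t vs path' vis'
termination_by 2 * pvFree g vis' * pvCap g + ns.length
decreasing_by
  · exact pv_dec_skip g vis' v vs
  · rename_i hc
    exact pv_dec_call g v vis' vs (by simp only [Bool.not_eq_true] at hc; exact hc)
  · exact pv_dec_skip g vis' v vs
end


def trace_cascade_path (graph : List (String × List String)) (source : String) (target : String)
    (path : Option (List String)) (visited : Option (List String)) : List String :=
  -- if path is None: path = []  /  if visited is None: visited = set()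
  pvDfsA graph target source (path.getD []) (visited.getD [])

-- ===== PORT B =====
-- literal transliteration of B's while-loop: the stack is modelled top-at-head, so Python's
-- 'extend with reversed(nbrs), pop from the end' is exactly 'prepend the neighbours in order'.
-- pvWt and the pv_dec_pop/pv_dec_push lemmas are cited only by pvRunB's decreasing_by.
def pvWt (g : List (String × List String)) (f : String × List String × PySem.Set String) : Nat :=
  pvCap g ^ (2 * pvFree g f.2.2 + (if PySem.Set.contains f.2.2 f.1 then 1 else 0))

lemma pv_sum_map_const (l : List String) (f : String → Nat) (c : Nat)
    (h : ∀ x ∈ l, f x = c) : (l.map f).sum = l.length * c := by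
  induction l with
  | nil => simp
  | cons a as ih =>
    simp only [List.map_cons, List.sum_cons, List.length_cons]
    rw [h a (List.mem_cons_self), ih (fun x hx => h x (List.mem_cons_of_mem _ hx)),
      Nat.succ_mul, Nat.add_comm]

lemma pv_children_sum_lt (g : List (String × List String)) (node : String)
    (vis : PySem.Set String) (ns : List String)
    (hns : (PySem.Dict.mk g).get? node = some ns)
    (cur : List String) :
    (((ns.filter (fun n => !PySem.Set.contains (PySem.Set.add vis node) n)).map
        (fun n => (n, cur, PySem.Set.add vis node))).map (pvWt g)).sum
      < pvWt g (node, cur, vis) := by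
  have hC : 2 ≤ pvCap g := Nat.le_add_left 2 _
  have hCpos : 0 < pvCap g := Nat.lt_of_lt_of_le Nat.zero_lt_two hC
  have hsum : (((ns.filter (fun n => !PySem.Set.contains (PySem.Set.add vis node) n)).map
      (fun n => (n, cur, PySem.Set.add vis node))).map (pvWt g)).sum
      = (ns.filter (fun n => !PySem.Set.contains (PySem.Set.add vis node) n)).length
          * pvCap g ^ (2 * pvFree g (PySem.Set.add vis node)) := by
    rw [List.map_map]
    apply pv_sum_map_const
    intro x hx
    have hxc : PySem.Set.contains (PySem.Set.add vis node) x = false :=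
      Bool.not_eq_true' .. ▸ (List.mem_filter.mp hx).2
    show pvCap g ^ (2 * pvFree g (PySem.Set.add vis node)
        + (if PySem.Set.contains (PySem.Set.add vis node) x then 1 else 0)) = _
    rw [hxc, if_neg Bool.false_ne_true, Nat.add_zero]
  rw [hsum]
  have hk : (ns.filter (fun n => !PySem.Set.contains (PySem.Set.add vis node) n)).length
      ≤ ns.length := List.length_filter_le _ _
  have hcap := pv_len_lt_cap g node ns hns
  have hkA : (ns.filter (fun n => !PySem.Set.contains (PySem.Set.add vis node) n)).length
      < pvCap g := Nat.lt_of_le_of_lt hk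
        (Nat.lt_of_lt_of_le (Nat.lt_add_of_pos_right Nat.zero_lt_two) hcap)
  by_cases hc : PySem.Set.contains vis node = true
  · -- node already visited: add is a no-op and the popped frame's weight carries the +1 flag
    have hse : PySem.Set.add vis node = vis := pvFree_add_eq g vis node hc
    have hwt : pvWt g (node, cur, vis) = pvCap g ^ (2 * pvFree g vis + 1) := by
      show pvCap g ^ (2 * pvFree g vis + (if PySem.Set.contains vis node then 1 else 0)) = _
      rw [hc, if_pos rfl]
    have hFe : pvFree g (PySem.Set.add vis node) = pvFree g vis := by rw [hse]
    rw [hwt, hFe, pow_succ, Nat.mul_comm (pvCap g ^ (2 * pvFree g vis)) (pvCap g)]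
    exact Nat.mul_lt_mul_of_lt_of_le hkA (Nat.le_refl _) (pow_pos hCpos _)
  · -- node newly visited: the free count drops, so the weight exponent drops by at least 2
    have hmemk : node ∈ g.map Prod.fst :=
      PySem.Dict.mem_keys_of_mem_items _ (PySem.Dict.mem_items_of_get?_eq_some _ hns)
    have hF'lt : pvFree g (PySem.Set.add vis node) < pvFree g vis :=
      pvFree_add_lt g vis node hmemk (Bool.not_eq_true _ ▸ hc)
    have hwt : pvWt g (node, cur, vis) = pvCap g ^ (2 * pvFree g vis) := by
      show pvCap g ^ (2 * pvFree g vis + (if PySem.Set.contains vis node then 1 else 0)) = _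
      rw [if_neg hc, Nat.add_zero]
    rw [hwt]
    calc (ns.filter (fun n => !PySem.Set.contains (PySem.Set.add vis node) n)).length
          * pvCap g ^ (2 * pvFree g (PySem.Set.add vis node))
        < pvCap g * pvCap g ^ (2 * pvFree g (PySem.Set.add vis node)) :=
          Nat.mul_lt_mul_of_lt_of_le hkA (Nat.le_refl _) (pow_pos hCpos _)
      _ = pvCap g ^ (2 * pvFree g (PySem.Set.add vis node) + 1) := by
          rw [pow_succ, Nat.mul_comm]
      _ ≤ pvCap g ^ (2 * pvFree g vis) := by
          apply Nat.pow_le_pow_right hCpos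
          have h3 : 2 * (pvFree g (PySem.Set.add vis node) + 1) ≤ 2 * pvFree g vis :=
            Nat.mul_le_mul_left 2 (Nat.succ_le_of_lt hF'lt)
          rw [Nat.mul_succ] at h3
          exact Nat.le_trans (Nat.add_le_add_left (Nat.le_succ 1) _) h3

lemma pv_dec_pop (g : List (String × List String)) (node : String) (pref : List String)
    (vis : PySem.Set String) (rest : List (String × List String × PySem.Set String)) :
    ((rest.map (pvWt g)).sum) < ((((node, pref, vis) :: rest).map (pvWt g)).sum) := by
  have h0 : 0 < pvWt g (node, pref, vis) :=
    pow_pos (Nat.lt_of_lt_of_le Nat.zero_lt_two (Nat.le_add_left 2 _)) _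
  simp only [List.map_cons, List.sum_cons]
  exact Nat.lt_add_of_pos_left h0

lemma pv_dec_push (g : List (String × List String)) (node : String) (pref : List String)
    (vis : PySem.Set String) (ns : List String)
    (hns : (PySem.Dict.mk g).get? node = some ns)
    (rest : List (String × List String × PySem.Set String)) :
    (((((ns.filter (fun n => !PySem.Set.contains (PySem.Set.add vis node) n)).map
        (fun n => (n, pref ++ [node], PySem.Set.add vis node))) ++ rest).map (pvWt g)).sum)
      < ((((node, pref, vis) :: rest).map (pvWt g)).sum) := by
  simp only [List.map_append, List.sum_append, List.map_cons, List.sum_cons]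
  exact Nat.add_lt_add_right (pv_children_sum_lt g node vis ns hns (pref ++ [node])) _

def pvRunB (g : List (String × List String)) (t : String)
    (stack : List (String × List String × PySem.Set String)) : List String :=
  match stack with
  | [] => []
  | (node, pref, vis) :: rest =>
    let cur := pref ++ [node]
    let seen := PySem.Set.add vis node
    if node = t then cur
    else
      match hns : (PySem.Dict.mk g).get? node with
      | none => pvRunB g t rest
      | some ns =>
          pvRunB g t
            ((ns.filter (fun n => !PySem.Set.contains seen n)).map (fun n => (n, cur, seen)) ++ rest)
termination_by (stack.map (pvWt g)).sum
decreasing_by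
  · exact pv_dec_pop g node pref vis rest
  · exact pv_dec_push g node pref vis ns hns rest

def trace_cascade_path_alt (graph : List (String × List String)) (source : String) (target : String)
    (path : Option (List String)) (visited : Option (List String)) : List String :=
  -- stack = [(source, [] if path is None else list(path), set() if visited is None else set(visited))]
  pvRunB graph target [(source, path.getD [], visited.getD [])]

-- ===== PRECONDITION & SPEC =====
def Spec_trace_cascade_path (graph : List (String × List String)) (source : String) (target : String) (path : Option (List String)) (visited : Option (List String)) (out : List String) : Prop := out = trace_cascade_path_alt graph source target path visited
instance (graph : List (String × List String)) (source : String) (target : String) (path : Option (List String)) (visited : Option (List String)) (out : List String) : Decidable (Spec_trace_cascade_path graph source target path visited out) := by unfold Spec_trace_cascade_path; infer_instance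

-- ===== CLAIM (what is proved, stated in full; the proofs are below) =====
def Claim_equal_trace_cascade_path : Prop := ∀ (graph : List (String × List String)) (source : String) (target : String) (path : Option (List String)) (visited : Option (List String)), Dom_trace_cascade_path graph source target path visited → Spec_trace_cascade_path graph source target path visited (trace_cascade_path graph source target path visited)

-- ===== LEMMAS AND PROOFS =====
-- The stack machine run on any frame (u, path, vis) on top behaves like the recursive DFS on that
-- frame: if the DFS fails (returns []) the run continues with the rest of the stack, otherwise it
-- returns the DFS's path.  Proved by the mutual functional induction of pvDfsA/pvGoA.
lemma pv_run_dfs (g : List (String × List String)) (t : String) :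
    ∀ (u : String) (path : List String) (vis : PySem.Set String)
      (rest : List (String × List String × PySem.Set String)),
      pvRunB g t ((u, path, vis) :: rest)
        = if pvDfsA g t u path vis = [] then pvRunB g t rest
          else pvDfsA g t u path vis := by
  apply pvDfsA.induct g t
    (motive1 := fun u path vis => ∀ rest,
      pvRunB g t ((u, path, vis) :: rest)
        = if pvDfsA g t u path vis = [] then pvRunB g t rest else pvDfsA g t u path vis)
    (motive2 := fun ns path' vis' => ∀ rest,
      pvRunB g t (((ns.filter (fun n => !PySem.Set.contains vis' n)).map
          (fun n => (n, path', vis'))) ++ rest)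
        = if pvGoA g t ns path' vis' = [] then pvRunB g t rest else pvGoA g t ns path' vis')
  · intro path vis rest
    simp [pvRunB, pvDfsA]
  · intro u path vis hne hnone rest
    rw [pvRunB, pvDfsA]
    simp only [hne, if_false]
    split <;> split <;> simp_all
  · intro u path vis path' vis' hne ns hns ih rest
    rw [pvRunB, pvDfsA]
    rw [if_neg hne, if_neg hne]
    split
    · rename_i heq
      rw [hns] at heq
      cases heq
    · rename_i ns1 heq
      rw [hns] at heq
      injection heq with h
      subst h
      split
      · rename_i heq2
        exact (ih rest).trans (by rw [if_pos heq2])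
      · rename_i heq2
        exact (ih rest).trans (by rw [if_neg heq2])
  · intro path' vis' rest
    simp only [List.filter_nil, List.map_nil, List.nil_append]
    rw [pvGoA]
    simp
  · intro path' vis' v vs hc ih rest
    rw [pvGoA]
    simp only [List.filter_cons, hc, Bool.not_true, if_true]
    simpa using ih rest
  · intro path' vis' v vs hc np hnp ih1 rest
    have hnp' : pvDfsA g t v path' vis' ≠ [] := hnp
    have hcf : PySem.Set.contains vis' v = false := by simpa using hc
    have hm : v ∉ vis' := by simpa [PySem.Set.contains] using hc
    have hgo : pvGoA g t (v :: vs) path' vis' = pvDfsA g t v path' vis' := by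
      rw [pvGoA]
      simp [hm, hnp']
    simp only [List.filter_cons, hcf, Bool.not_false, if_true, List.map_cons, List.cons_append]
    rw [ih1 ((vs.filter (fun n => !PySem.Set.contains vis' n)).map (fun n => (n, path', vis')) ++ rest)]
    rw [if_neg hnp', hgo, if_neg hnp']
  · intro path' vis' v vs hc np hnp ih1 ih2 rest
    have he : pvDfsA g t v path' vis' = [] := by
      have : ¬ (pvDfsA g t v path' vis' ≠ []) := hnp
      simpa using this
    have hcf : PySem.Set.contains vis' v = false := by simpa using hc
    have hm : v ∉ vis' := by simpa [PySem.Set.contains] using hc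
    have hgo : pvGoA g t (v :: vs) path' vis' = pvGoA g t vs path' vis' := by
      rw [pvGoA]
      simp [hm, he]
    simp only [List.filter_cons, hcf, Bool.not_false, if_true, List.map_cons, List.cons_append]
    rw [ih1 ((vs.filter (fun n => !PySem.Set.contains vis' n)).map (fun n => (n, path', vis')) ++ rest)]
    rw [if_pos he, ih2 rest, hgo]

-- ===== VERDICT (by name: the statement is the Claim_ definition above) =====
theorem trace_cascade_path_spec : Claim_equal_trace_cascade_path := by
  intro graph source target path visited _
  unfold Spec_trace_cascade_path trace_cascade_path trace_cascade_path_alt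
  rw [pv_run_dfs]
  by_cases h : pvDfsA graph target source (path.getD []) (visited.getD []) = []
  · rw [if_pos h, h, pvRunB]
  · rw [if_neg h]
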